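-- pv_equiv track=rewrite | github.com/deepmodeling/deepmd-kit | deepmd/utils/finetune.py | get_index_between_two_maps
-- ===== SOURCE A (Python) =====
-- from typing import (
--     TYPE_CHECKING,
--     List,
--     Tuple,
-- )
--
-- def get_index_between_two_maps(
--     large_map: List[str],
--     small_map: List[str],
-- ):
--     """Returns the mapping index of types in small_map to those in the large_map.
--
--     Parameters
--     ----------
--     large_map : List[str]
--         The larger list of atom type names.
--     small_map : List[str]
--         The smaller list of atom type names.
--
--     Returns
--     -------
--     slimmed_index: List[int]
--         The indices in the larger type list that correspond to the types in the smaller type list.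
--     """
--     missing_type = [i for i in small_map if i not in large_map]
--     assert not missing_type, (
--         "Only support for smaller type map when doing type slimming!"
--         f"While these types are not in the pretrained model: {missing_type}."
--     )
--     return [large_map.index(i) for i in small_map]
-- ===== SOURCE B (Python) =====
-- def get_index_between_two_maps(
--     large_map,
--     small_map,
-- ):
--     """Inverted scatter: group small_map slots by name, then sweep large_map once,
--     popping each name on its first occurrence and writing that index into all of
--     the name's slots; slots never written keep the -1 sentinel and are missing."""
--     positions = {}
--     for j, name in enumerate(small_map):
--         positions.setdefault(name, []).append(j)
--     out = [-1] * len(small_map)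
--     for i, name in enumerate(large_map):
--         if name in positions:
--             for j in positions.pop(name):
--                 out[j] = i
--     missing_type = [name for j, name in enumerate(small_map) if out[j] < 0]
--     assert not missing_type, (
--         "Only support for smaller type map when doing type slimming!"
--         f"While these types are not in the pretrained model: {missing_type}."
--     )
--     return out
-- ===== Notes on version B (the rewrite author's own statement) =====
-- stated objective: alternative
-- what changed: Inverts the traversal: instead of testing membership and running list.index over large_map for every small_map element, B groups small_map slot positions by name once, then sweeps large_map once popping each name at its first occurrence and scattering that index into the name's slots, detecting missing names by an untouched -1 sentinel; O(n+m) operations instead of O(n*m), though not measurably faster on the benchmark's duplicate-heavy inputs.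
import Mathlib
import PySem

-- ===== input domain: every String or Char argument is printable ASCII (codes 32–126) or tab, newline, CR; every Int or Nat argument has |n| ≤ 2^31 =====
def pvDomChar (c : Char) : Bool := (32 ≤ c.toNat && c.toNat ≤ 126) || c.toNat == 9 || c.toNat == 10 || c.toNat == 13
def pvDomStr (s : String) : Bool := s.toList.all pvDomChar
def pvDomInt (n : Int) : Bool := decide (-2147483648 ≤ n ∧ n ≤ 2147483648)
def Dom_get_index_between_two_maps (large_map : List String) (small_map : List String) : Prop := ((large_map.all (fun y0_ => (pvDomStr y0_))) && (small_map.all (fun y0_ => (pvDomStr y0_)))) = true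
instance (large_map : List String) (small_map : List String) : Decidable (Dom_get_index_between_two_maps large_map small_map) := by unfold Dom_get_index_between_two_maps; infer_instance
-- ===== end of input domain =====

-- B inverts the traversal: it groups small_map slot positions by name once, then sweeps large_map once,
-- popping each name at its first occurrence and scattering that index into the name's slots; missing
-- names are detected by the untouched -1 sentinel. Both raise AssertionError on names missing from
-- large_map (outside Pre_).


-- ===== PORT A =====
-- A: filter out missing names (assert raises when nonempty → excluded by Pre_), then map list.index over small_map.
def get_index_between_two_maps (large_map : List String) (small_map : List String) : List Int :=
  let missing_type := small_map.filter (fun i => !(large_map.contains i))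
  -- Python asserts missing_type == []; when it is nonempty A raises AssertionError — those inputs are outside Pre_.
  let _ := missing_type
  small_map.map (fun i => (((PySem.List.index? large_map i).getD 0 : Nat) : Int))

-- ===== PORT B =====
-- B: positions dict (name → slots), sentinel-filled out, single sweep over large_map popping each name at
-- its first occurrence and scattering that index, then the sentinel-based missing check.
def get_index_between_two_maps_alt (large_map : List String) (small_map : List String) : List Int :=
  let positions := (PySem.List.enumerate small_map 0).foldl
    (fun (d : PySem.Dict String (List Int)) p => d.modify p.2 [] (· ++ [p.1]))
    PySem.Dict.empty
  let out0 := List.replicate small_map.length (-1 : Int)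
  let r := (PySem.List.enumerate large_map 0).foldl
    (fun (st : List Int × PySem.Dict String (List Int)) p =>
      if st.2.contains p.2 then
        -- positions.pop(name): read the slot list, delete the key
        ((st.2.getD p.2 []).foldl (fun o j => o.set j.toNat p.1) st.1,  -- j ≥ 0 always (slot index), so .toNat is exact
         st.2.erase p.2)
      else st)
    (out0, positions)
  let out := r.1
  let missing_type := (PySem.List.enumerate small_map 0).filter
    (fun p => decide (PySem.List.pyGetD out p.1 0 < 0)) |>.map (·.2)
  -- Python asserts missing_type == []; when it is nonempty B raises AssertionError — outside Pre_.
  let _ := missing_type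
  out

-- ===== PRECONDITION & SPEC =====
-- Pre_: every small_map name occurs in large_map; otherwise the assert in both A and B raises AssertionError.
def Pre_get_index_between_two_maps (large_map : List String) (small_map : List String) : Prop :=
  ∀ i ∈ small_map, i ∈ large_map
instance (large_map : List String) (small_map : List String) : Decidable (Pre_get_index_between_two_maps large_map small_map) := by unfold Pre_get_index_between_two_maps; infer_instance
def pvWitness_get_index_between_two_maps : List String × List String := (["a", "b"], ["b", "a", "b"])
def Spec_get_index_between_two_maps (large_map : List String) (small_map : List String) (out : List Int) : Prop := out = get_index_between_two_maps_alt large_map small_map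
instance (large_map : List String) (small_map : List String) (out : List Int) : Decidable (Spec_get_index_between_two_maps large_map small_map out) := by unfold Spec_get_index_between_two_maps; infer_instance

-- ===== CLAIM (what is proved, stated in full; the proofs are below) =====
def Claim_equal_get_index_between_two_maps : Prop := ∀ (large_map : List String) (small_map : List String), Dom_get_index_between_two_maps large_map small_map → Pre_get_index_between_two_maps large_map small_map → Spec_get_index_between_two_maps large_map small_map (get_index_between_two_maps large_map small_map)

-- ===== LEMMAS AND PROOFS =====

-- The slot list of a name: the small_map positions holding that name, in order.
def posList (small : List String) (x : String) : List Int :=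
  ((PySem.List.enumerate small 0).filter (fun p => p.2 == x)).map (·.1)

-- The positions dict groups each name's small_map slot indices (in order).
theorem getD_buildPos (s : List String) (n : Int) (d : PySem.Dict String (List Int)) (x : String) :
    ((PySem.List.enumerate s n).foldl
      (fun (d : PySem.Dict String (List Int)) p => d.modify p.2 [] (· ++ [p.1])) d).getD x []
    = d.getD x [] ++ ((PySem.List.enumerate s n).filter (fun p => p.2 == x)).map (·.1) := by
  induction s generalizing n d with
  | nil => simp [PySem.List.enumerate]
  | cons y ys ih =>
    rw [PySem.List.enumerate_cons, List.foldl_cons, ih]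
    by_cases h : y = x
    · subst h
      rw [PySem.Dict.getD_modify_self]
      simp
    · rw [PySem.Dict.getD_modify_of_ne d _ _ (fun hh => h hh.symm)]
      simp [h]

-- Membership in a name's slot list.
theorem mem_posList (s : List String) (x : String) (j : Int) :
    j ∈ posList s x ↔ ∃ k : Nat, ∃ _ : k < s.length, j = (k : Int) ∧ s[k] = x := by
  unfold posList
  simp only [List.mem_map, List.mem_filter, PySem.List.mem_enumerate_iff]
  constructor
  · rintro ⟨p, ⟨⟨k, hk, rfl⟩, hx⟩, rfl⟩
    exact ⟨k, hk, by simpa using hx⟩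
  · rintro ⟨k, hk, rfl, hx⟩
    exact ⟨((k : Int), s[k]), ⟨⟨k, hk, by simp⟩, by simpa using hx⟩, rfl⟩

-- Erasing a key: all entries of that key go, every other lookup is unchanged.
theorem dict_get?_erase {ν : Type} (d : PySem.Dict String ν) (k x : String) :
    (d.erase k).get? x = if x = k then none else d.get? x := by
  obtain ⟨items⟩ := d
  induction items with
  | nil => by_cases hxk : x = k <;> simp [PySem.Dict.erase, PySem.Dict.get?, hxk]
  | cons p ps ih =>
    simp only [PySem.Dict.erase, PySem.Dict.get?] at ih ⊢
    by_cases hpk : p.1 = k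
    · rw [List.filter_cons_of_neg (by simp [hpk])]
      rw [ih]
      by_cases hxk : x = k
      · simp [hxk]
      · have h2 : (p.1 == x) = false := by
          simp only [beq_eq_false_iff_ne, ne_eq]
          exact fun h => hxk ((h.symm.trans hpk) ▸ rfl)
        simp [hxk, h2]
    · rw [List.filter_cons_of_pos (by simp [hpk])]
      by_cases hpx : p.1 = x
      · have hxk : ¬ x = k := fun h => hpk (hpx.trans h)
        simp [hpx, hxk]
      · have h2 : (p.1 == x) = false := by simp [hpx]
        simpa [List.find?_cons, h2] using ih

theorem dict_contains_erase {ν : Type} (d : PySem.Dict String ν) (k x : String) :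
    (d.erase k).contains x = if x = k then false else d.contains x := by
  rw [PySem.Dict.contains_eq_isSome_get?, dict_get?_erase]
  by_cases h : x = k
  · simp [h]
  · simp [h, PySem.Dict.contains_eq_isSome_get?]

-- Writing a value into a set of slots: pointwise effect.
theorem get?_scatter (js : List Int) (o : List Int) (v : Int) (j : Nat)
    (hnn : ∀ j' ∈ js, 0 ≤ j' ∧ j'.toNat < o.length) :
    (js.foldl (fun o j' => o.set j'.toNat v) o)[j]?
    = if (j : Int) ∈ js then some v else o[j]? := by
  induction js generalizing o with
  | nil => simp
  | cons a as ih =>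
    have ha := hnn a (List.mem_cons_self ..)
    rw [List.foldl_cons,
        ih _ (fun j' hj' => by
          have h := hnn j' (List.mem_cons_of_mem _ hj')
          simpa using h)]
    by_cases hmem : (j : Int) ∈ as
    · simp [hmem]
    · by_cases hja : (j : Int) = a
      · have hja' : a.toNat = j := by omega
        have hlen : j < o.length := hja' ▸ ha.2
        simp [hmem, hja.symm, hlen]
      · have hne : a.toNat ≠ j := by omega
        simp [hmem, hja, List.getElem?_set_ne hne]

theorem length_scatter (js : List Int) (o : List Int) (v : Int) :
    (js.foldl (fun o j' => o.set j'.toNat v) o).length = o.length := by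
  induction js generalizing o with
  | nil => rfl
  | cons a as ih => rw [List.foldl_cons, ih]; simp

-- The sweep's step function (abbreviation for the lemmas below; identical to the port's step).
def sweepStep (st : List Int × PySem.Dict String (List Int)) (p : Int × String) :
    List Int × PySem.Dict String (List Int) :=
  if st.2.contains p.2 then
    ((st.2.getD p.2 []).foldl (fun o j => o.set j.toNat p.1) st.1, st.2.erase p.2)
  else st

theorem length_sweep (l : List String) (n : Int) (o : List Int)
    (d : PySem.Dict String (List Int)) :
    ((PySem.List.enumerate l n).foldl sweepStep (o, d)).1.length = o.length := by
  induction l generalizing n o d with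
  | nil => simp [PySem.List.enumerate]
  | cons x xs ih =>
    rw [PySem.List.enumerate_cons, List.foldl_cons]
    by_cases hc : d.contains x
    · have hstep : sweepStep (o, d) (n, x)
          = ((d.getD x []).foldl (fun o j' => o.set j'.toNat n) o, d.erase x) := by
        simp [sweepStep, hc]
      rw [hstep, ih, length_scatter]
    · have hstep : sweepStep (o, d) (n, x) = (o, d) := by
        simp [sweepStep, hc]
      rw [hstep, ih]

-- The sweep fills each still-pending slot with its name's first index in large_map.
theorem get?_sweep (small : List String) (l : List String) (n : Int) (o : List Int)
    (d : PySem.Dict String (List Int)) (j : Nat)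
    (hj : j < small.length) (ho : o.length = small.length)
    (hd : ∀ x, d.get? x = some (posList small x) ∨ d.get? x = none) :
    ((PySem.List.enumerate l n).foldl sweepStep (o, d)).1[j]?
    = if d.contains small[j] ∧ small[j] ∈ l
      then some (n + ((PySem.List.index? l small[j]).getD 0 : Nat))
      else o[j]? := by
  induction l generalizing n o d with
  | nil => simp [PySem.List.enumerate]
  | cons x xs ih =>
    rw [PySem.List.enumerate_cons, List.foldl_cons]
    by_cases hc : d.contains x
    · have hget : d.get? x = some (posList small x) := by
        rcases hd x with h | h
        · exact h
        · rw [PySem.Dict.contains_eq_isSome_get?, h] at hc; simp at hc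
      have hgetD : d.getD x [] = posList small x :=
        PySem.Dict.getD_of_get?_eq_some _ [] hget
      have hstep : sweepStep (o, d) (n, x)
          = ((posList small x).foldl (fun o j' => o.set j'.toNat n) o, d.erase x) := by
        simp [sweepStep, hc, hgetD]
      rw [hstep]
      have ho' : ((posList small x).foldl (fun o j' => o.set j'.toNat n) o).length
          = small.length := by rw [length_scatter, ho]
      have hd' : ∀ y, (d.erase x).get? y = some (posList small y) ∨ (d.erase x).get? y = none := by
        intro y
        rw [dict_get?_erase]
        by_cases hy : y = x
        · simp [hy]
        · simpa [hy] using hd y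
      rw [ih _ _ _ ho' hd']
      have hsc := get?_scatter (posList small x) o n j
        (fun j' hj' => by
          rcases (mem_posList small x j').mp hj' with ⟨k, hk, rfl, _⟩
          refine ⟨Int.natCast_nonneg k, ?_⟩
          rw [ho]; simpa using hk)
      by_cases hx : small[j] = x
      · have hcx : (d.erase x).contains small[j] = false := by
          rw [hx, dict_contains_erase]; simp
        rw [if_neg (fun h => by rw [hcx] at h; exact absurd h.1 (by simp)), hsc,
            if_pos ((mem_posList small x (j : Int)).mpr ⟨j, hj, rfl, hx⟩),
            if_pos ⟨by rw [hx]; exact hc, by rw [hx]; exact List.mem_cons_self ..⟩,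
            hx, PySem.List.index?_cons_self]
        simp
      · have hcx : (d.erase x).contains small[j] = d.contains small[j] := by
          rw [dict_contains_erase, if_neg hx]
        have hnot : ¬ ((j : Int) ∈ posList small x) := by
          intro hmem
          rcases (mem_posList small x (j : Int)).mp hmem with ⟨k, hk, hkj, hkx⟩
          have : k = j := by omega
          exact hx (this ▸ hkx)
        rw [hsc, if_neg hnot, PySem.List.index?_cons_of_ne _ (fun h => hx h.symm)]
        by_cases hcs : d.contains small[j]
        · by_cases hmem : small[j] ∈ xs
          · rw [if_pos ⟨by rw [hcx]; exact hcs, hmem⟩,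
                if_pos ⟨hcs, List.mem_cons_of_mem _ hmem⟩]
            rcases Option.isSome_iff_exists.mp
              ((PySem.List.index?_isSome_iff xs small[j]).mpr hmem) with ⟨k, hk⟩
            rw [hk]
            simp
            omega
          · rw [if_neg (fun h => hmem h.2),
                if_neg (fun h => (by simpa [hx, hmem] using h.2 : False))]
        · rw [if_neg (fun h => by rw [hcx] at h; exact absurd h.1 hcs),
              if_neg (fun h => absurd h.1 hcs)]
    · have hstep : sweepStep (o, d) (n, x) = (o, d) := by
        simp [sweepStep, hc]
      rw [hstep, ih _ _ _ ho hd]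
      by_cases hx : small[j] = x
      · rw [if_neg (fun h => by rw [hx] at h; exact hc h.1),
            if_neg (fun h => by rw [hx] at h; exact hc h.1)]
      · rw [PySem.List.index?_cons_of_ne _ (fun h => hx h.symm)]
        by_cases hcs : d.contains small[j]
        · by_cases hmem : small[j] ∈ xs
          · rw [if_pos ⟨hcs, hmem⟩, if_pos ⟨hcs, List.mem_cons_of_mem _ hmem⟩]
            rcases Option.isSome_iff_exists.mp
              ((PySem.List.index?_isSome_iff xs small[j]).mpr hmem) with ⟨k, hk⟩
            rw [hk]
            simp
            omega
          · rw [if_neg (fun h => hmem h.2),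
                if_neg (fun h => (by simpa [hx, hmem] using h.2 : False))]
        · rw [if_neg (fun h => absurd h.1 hcs), if_neg (fun h => absurd h.1 hcs)]

-- The positions dict: slot lists (hence hd) and key presence for every name of small_map.
theorem buildPos_get? (small : List String) (x : String) :
    ((PySem.List.enumerate small 0).foldl
      (fun (d : PySem.Dict String (List Int)) p => d.modify p.2 [] (· ++ [p.1]))
      PySem.Dict.empty).get? x = some (posList small x)
    ∨ ((PySem.List.enumerate small 0).foldl
      (fun (d : PySem.Dict String (List Int)) p => d.modify p.2 [] (· ++ [p.1]))
      PySem.Dict.empty).get? x = none := by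
  have hD := getD_buildPos small 0 PySem.Dict.empty x
  rw [PySem.Dict.getD_empty] at hD
  cases hh : ((PySem.List.enumerate small 0).foldl
      (fun (d : PySem.Dict String (List Int)) p => d.modify p.2 [] (· ++ [p.1]))
      PySem.Dict.empty).get? x with
  | none => exact Or.inr rfl
  | some v =>
    left
    have hv := PySem.Dict.getD_of_get?_eq_some _ ([] : List Int) hh
    rw [hv] at hD
    rw [hD]
    simp [posList]

theorem buildPos_contains (small : List String) (j : Nat) (hj : j < small.length) :
    ((PySem.List.enumerate small 0).foldl
      (fun (d : PySem.Dict String (List Int)) p => d.modify p.2 [] (· ++ [p.1]))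
      PySem.Dict.empty).contains small[j] = true := by
  rcases buildPos_get? small small[j] with h | h
  · rw [PySem.Dict.contains_eq_isSome_get?, h]; rfl
  · exfalso
    have hD := getD_buildPos small 0 PySem.Dict.empty small[j]
    rw [PySem.Dict.getD_empty, PySem.Dict.getD_of_get?_eq_none _ _ h] at hD
    have hmem : (j : Int) ∈ posList small small[j] :=
      (mem_posList small small[j] (j : Int)).mpr ⟨j, hj, rfl, rfl⟩
    have hempty : posList small small[j] = [] := by simpa [posList] using hD.symm
    rw [hempty] at hmem
    simp at hmem

-- ===== VERDICT (by name: the statement is the Claim_ definition above) =====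
theorem get_index_between_two_maps_spec : Claim_equal_get_index_between_two_maps := by
  intro large_map small_map _hdom hpre
  unfold Spec_get_index_between_two_maps
  unfold get_index_between_two_maps get_index_between_two_maps_alt
  apply List.ext_getElem?
  intro j
  show _ = ((PySem.List.enumerate large_map 0).foldl sweepStep _).1[j]?
  by_cases hj : j < small_map.length
  · rw [get?_sweep small_map large_map 0 _ _ j hj (by simp)
        (buildPos_get? small_map),
        if_pos ⟨buildPos_contains small_map j hj, hpre _ (List.getElem_mem hj)⟩]
    simp [hj]
  · have h1 : (small_map.map
        (fun i => (((PySem.List.index? large_map i).getD 0 : Nat) : Int)))[j]? = none := by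
      simp; omega
    have h2 := length_sweep large_map 0 (List.replicate small_map.length (-1 : Int))
      ((PySem.List.enumerate small_map 0).foldl
        (fun (d : PySem.Dict String (List Int)) p => d.modify p.2 [] (· ++ [p.1]))
        PySem.Dict.empty)
    rw [h1, List.getElem?_eq_none]
    rw [h2]; simp; omega
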